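-- pv_equiv track=rewrite | github.com/WHOIGit/PhytO-ARM | server.py | _categorize_process
-- ===== SOURCE A (Python) =====
-- def _categorize_process(process_name: str) -> str:
--     """Categorize process based on name patterns"""
--     name_lower = process_name.lower()
--
--     if 'arm' in name_lower:
--         return "mission"
--     elif any(word in name_lower for word in ['mock', 'sim', 'test']):
--         return "simulation"
--     elif any(word in name_lower for word in ['sensor', 'ctd', 'gps', 'camera']):
--         return "sensors"
--     elif any(word in name_lower for word in ['main', 'core', 'base']):
--         return "core"
--     else:
--         return "other"
-- ===== SOURCE B (Python) =====
-- _KEYWORD_PRIORITY = [('arm', 0), ('mock', 1), ('sim', 1), ('test', 1),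
--                      ('sensor', 2), ('ctd', 2), ('gps', 2), ('camera', 2),
--                      ('main', 3), ('core', 3), ('base', 3)]
-- _CATEGORIES = ['mission', 'simulation', 'sensors', 'core']
--
-- def _categorize_process(process_name: str) -> str:
--     """Single character-level scan over the name: at each position record the
--     lowest-priority keyword starting there; the minimum priority found anywhere
--     selects the category."""
--     name = process_name.lower()
--     best = 4
--     for i in range(len(name)):
--         for kw, pri in _KEYWORD_PRIORITY:
--             if pri < best and name.startswith(kw, i):
--                 best = pri
--     return _CATEGORIES[best] if best < 4 else 'other'
-- ===== Notes on version B (the rewrite author's own statement) =====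
-- stated objective: alternative
-- what changed: Instead of A's ordered if-elif chain of substring-containment tests, B makes one character-level scan over the name, checking at every position which keywords start there and keeping the minimum keyword priority seen; the final minimum selects the category (trades C-level substring search for an explicit scan, so it is not faster in CPython).
import Mathlib
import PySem

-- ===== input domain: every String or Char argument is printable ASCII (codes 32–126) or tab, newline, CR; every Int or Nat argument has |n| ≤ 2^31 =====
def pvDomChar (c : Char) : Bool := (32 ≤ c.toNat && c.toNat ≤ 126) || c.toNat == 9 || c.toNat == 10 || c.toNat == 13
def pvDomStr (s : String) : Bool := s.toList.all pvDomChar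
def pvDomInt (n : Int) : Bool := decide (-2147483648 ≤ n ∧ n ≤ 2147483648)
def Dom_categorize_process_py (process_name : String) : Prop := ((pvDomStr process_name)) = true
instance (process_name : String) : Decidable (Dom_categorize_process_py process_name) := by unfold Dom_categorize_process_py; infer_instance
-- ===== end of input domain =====

-- B replaces A's ordered if-elif chain of containment tests by ONE character-level
-- scan keeping the minimum matched keyword priority (alternative decomposition; no speed claim).

-- ===== PORT A =====
def categorize_process_py (process_name : String) : String :=
  let name_lower := PySem.Str.lower process_name
  if PySem.Str.isIn "arm" name_lower then "mission"
  else if (["mock", "sim", "test"].any (fun word => PySem.Str.isIn word name_lower)) then "simulation"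
  else if (["sensor", "ctd", "gps", "camera"].any (fun word => PySem.Str.isIn word name_lower)) then "sensors"
  else if (["main", "core", "base"].any (fun word => PySem.Str.isIn word name_lower)) then "core"
  else "other"

-- ===== PORT B =====
def pvKwPri : List (List Char × Nat) :=
  [("arm".toList, 0), ("mock".toList, 1), ("sim".toList, 1), ("test".toList, 1),
   ("sensor".toList, 2), ("ctd".toList, 2), ("gps".toList, 2), ("camera".toList, 2),
   ("main".toList, 3), ("core".toList, 3), ("base".toList, 3)]

def pvCategories : List String := ["mission", "simulation", "sensors", "core"]

def categorize_process_py_alt (process_name : String) : String :=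
  let name := (PySem.Str.lower process_name).toList
  let best := (List.range name.length).foldl
    (fun b i => pvKwPri.foldl
      (fun b' kp => if kp.2 < b' ∧ PySem.Chars.startswith (name.drop i) kp.1 = true then kp.2 else b') b) 4
  if best < 4 then pvCategories.getD best "other" else "other"

-- ===== PRECONDITION & SPEC =====
def Spec_categorize_process_py (process_name : String) (out : String) : Prop := out = categorize_process_py_alt process_name
instance (process_name : String) (out : String) : Decidable (Spec_categorize_process_py process_name out) := by unfold Spec_categorize_process_py; infer_instance

-- ===== CLAIM (what is proved, stated in full; the proofs are below) =====
def Claim_equal_categorize_process_py : Prop := ∀ (process_name : String), Dom_categorize_process_py process_name → Spec_categorize_process_py process_name (categorize_process_py process_name)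

-- ===== LEMMAS AND PROOFS =====

lemma pvFoldlMin_le_init (l : List Nat) (b : Nat) : l.foldl min b ≤ b := by
  induction l generalizing b with
  | nil => simp
  | cons x xs ih => exact le_trans (ih _) (Nat.min_le_left _ _)

lemma pvFoldlMin_le_mem (l : List Nat) (b x : Nat) (hx : x ∈ l) : l.foldl min b ≤ x := by
  induction l generalizing b with
  | nil => cases hx
  | cons y ys ih =>
      rcases List.mem_cons.mp hx with h | h
      · subst h
        rw [List.foldl_cons]
        exact le_trans (pvFoldlMin_le_init _ _) (Nat.min_le_right _ _)
      · exact ih _ h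

lemma pvFoldlMin_eq_or_mem (l : List Nat) (b : Nat) : l.foldl min b = b ∨ l.foldl min b ∈ l := by
  induction l generalizing b with
  | nil => left; rfl
  | cons x xs ih =>
      rcases ih (min b x) with h | h
      · rcases Nat.le_total b x with hbx | hxb
        · left
          rw [List.foldl_cons, h, Nat.min_eq_left hbx]
        · right
          rw [List.foldl_cons, h, Nat.min_eq_right hxb]
          exact List.mem_cons_self
      · right; exact List.mem_cons_of_mem _ h

lemma pvFoldl_addIf {α : Type} (p : α → Bool) (g : α → Nat) (xs : List α) (b : Nat) :
    xs.foldl (fun b' x => if g x < b' ∧ p x = true then g x else b') b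
      = ((xs.filter p).map g).foldl min b := by
  induction xs generalizing b with
  | nil => rfl
  | cons x xs ih =>
      by_cases hp : p x = true
      · simp only [List.foldl_cons, List.filter_cons, hp, if_true, List.map_cons, and_true]
        rw [ih]
        congr 1
        split_ifs with h <;> omega
      · simp only [List.foldl_cons, List.filter_cons, hp]
        simp only [Bool.false_eq_true, if_false, and_false]
        exact ih b

lemma pvFoldl_flat (h : Nat → List Nat) (xs : List Nat) (b : Nat) :
    xs.foldl (fun b' i => (h i).foldl min b') b = (xs.flatMap h).foldl min b := by
  induction xs generalizing b with
  | nil => rfl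
  | cons x xs ih => simp only [List.foldl_cons, List.flatMap_cons, List.foldl_append]; exact ih _

def pvBigL (m : List Char) : List Nat :=
  (List.range m.length).flatMap
    (fun i => ((pvKwPri.filter (fun kp => PySem.Chars.startswith (m.drop i) kp.1)).map (·.2)))

lemma pvBest_eq (m : List Char) :
    (List.range m.length).foldl
      (fun b i => pvKwPri.foldl
        (fun b' kp => if kp.2 < b' ∧ PySem.Chars.startswith (m.drop i) kp.1 = true then kp.2 else b') b) 4
      = (pvBigL m).foldl min 4 := by
  unfold pvBigL
  rw [← pvFoldl_flat]
  apply List.foldl_ext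
  intro b i hi
  exact pvFoldl_addIf _ _ _ _

lemma pvExists_startswith_iff (kw m : List Char) (hkw : kw ≠ []) :
    (∃ i, i < m.length ∧ PySem.Chars.startswith (m.drop i) kw = true) ↔
      PySem.Chars.isIn kw m = true := by
  rw [← PySem.Chars.exists_prefix_drop_iff_isIn]
  constructor
  · rintro ⟨i, _, h⟩
    exact ⟨i, (PySem.Chars.startswith_iff _ _).mp h⟩
  · rintro ⟨j, hj⟩
    by_cases hlt : j < m.length
    · exact ⟨j, hlt, (PySem.Chars.startswith_iff _ _).mpr hj⟩
    · exfalso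
      have : m.drop j = [] := List.drop_eq_nil_of_le (by omega)
      rw [this] at hj
      exact hkw (List.prefix_nil.mp hj)

lemma pvMem_bigL (m : List Char) (p : Nat) :
    p ∈ pvBigL m ↔ ∃ kp ∈ pvKwPri, kp.2 = p ∧ PySem.Chars.isIn kp.1 m = true := by
  unfold pvBigL
  simp only [List.mem_flatMap, List.mem_range, List.mem_map, List.mem_filter]
  constructor
  · rintro ⟨i, hi, kp, ⟨hmem, hsw⟩, hp⟩
    refine ⟨kp, hmem, hp, ?_⟩
    have hne : kp.1 ≠ [] := by
      revert hmem; unfold pvKwPri; intro hmem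
      fin_cases hmem <;> simp
    exact (pvExists_startswith_iff _ _ hne).mp ⟨i, hi, hsw⟩
  · rintro ⟨kp, hmem, hp, hin⟩
    have hne : kp.1 ≠ [] := by
      revert hmem; unfold pvKwPri; intro hmem
      fin_cases hmem <;> simp
    obtain ⟨i, hi, hsw⟩ := (pvExists_startswith_iff _ _ hne).mpr hin
    exact ⟨i, hi, kp, ⟨hmem, hsw⟩, hp⟩

lemma pvMem_iff (m : List Char) (p : Nat) :
    p ∈ pvBigL m ↔
      (p = 0 ∧ PySem.Chars.isIn "arm".toList m = true) ∨
      (p = 1 ∧ (PySem.Chars.isIn "mock".toList m = true ∨ PySem.Chars.isIn "sim".toList m = true ∨ PySem.Chars.isIn "test".toList m = true)) ∨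
      (p = 2 ∧ (PySem.Chars.isIn "sensor".toList m = true ∨ PySem.Chars.isIn "ctd".toList m = true ∨ PySem.Chars.isIn "gps".toList m = true ∨ PySem.Chars.isIn "camera".toList m = true)) ∨
      (p = 3 ∧ (PySem.Chars.isIn "main".toList m = true ∨ PySem.Chars.isIn "core".toList m = true ∨ PySem.Chars.isIn "base".toList m = true)) := by
  rw [pvMem_bigL]
  unfold pvKwPri
  simp only [List.mem_cons, List.not_mem_nil, or_false]
  constructor
  · rintro ⟨kp, hmem, hp, hin⟩
    rcases hmem with h|h|h|h|h|h|h|h|h|h|h <;> subst h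
    · exact Or.inl ⟨hp.symm, hin⟩
    · exact Or.inr (Or.inl ⟨hp.symm, Or.inl hin⟩)
    · exact Or.inr (Or.inl ⟨hp.symm, Or.inr (Or.inl hin)⟩)
    · exact Or.inr (Or.inl ⟨hp.symm, Or.inr (Or.inr hin)⟩)
    · exact Or.inr (Or.inr (Or.inl ⟨hp.symm, Or.inl hin⟩))
    · exact Or.inr (Or.inr (Or.inl ⟨hp.symm, Or.inr (Or.inl hin)⟩))
    · exact Or.inr (Or.inr (Or.inl ⟨hp.symm, Or.inr (Or.inr (Or.inl hin))⟩))
    · exact Or.inr (Or.inr (Or.inl ⟨hp.symm, Or.inr (Or.inr (Or.inr hin))⟩))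
    · exact Or.inr (Or.inr (Or.inr ⟨hp.symm, Or.inl hin⟩))
    · exact Or.inr (Or.inr (Or.inr ⟨hp.symm, Or.inr (Or.inl hin)⟩))
    · exact Or.inr (Or.inr (Or.inr ⟨hp.symm, Or.inr (Or.inr hin)⟩))
  · rintro (⟨rfl, h⟩ | ⟨rfl, h | h | h⟩ | ⟨rfl, h | h | h | h⟩ | ⟨rfl, h | h | h⟩)
    · exact ⟨("arm".toList, 0), Or.inl rfl, rfl, h⟩
    · exact ⟨("mock".toList, 1), Or.inr (Or.inl rfl), rfl, h⟩
    · exact ⟨("sim".toList, 1), Or.inr (Or.inr (Or.inl rfl)), rfl, h⟩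
    · exact ⟨("test".toList, 1), Or.inr (Or.inr (Or.inr (Or.inl rfl))), rfl, h⟩
    · exact ⟨("sensor".toList, 2), Or.inr (Or.inr (Or.inr (Or.inr (Or.inl rfl)))), rfl, h⟩
    · exact ⟨("ctd".toList, 2), Or.inr (Or.inr (Or.inr (Or.inr (Or.inr (Or.inl rfl))))), rfl, h⟩
    · exact ⟨("gps".toList, 2), Or.inr (Or.inr (Or.inr (Or.inr (Or.inr (Or.inr (Or.inl rfl)))))), rfl, h⟩
    · exact ⟨("camera".toList, 2), Or.inr (Or.inr (Or.inr (Or.inr (Or.inr (Or.inr (Or.inr (Or.inl rfl))))))), rfl, h⟩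
    · exact ⟨("main".toList, 3), Or.inr (Or.inr (Or.inr (Or.inr (Or.inr (Or.inr (Or.inr (Or.inr (Or.inl rfl)))))))), rfl, h⟩
    · exact ⟨("core".toList, 3), Or.inr (Or.inr (Or.inr (Or.inr (Or.inr (Or.inr (Or.inr (Or.inr (Or.inr (Or.inl rfl))))))))), rfl, h⟩
    · exact ⟨("base".toList, 3), Or.inr (Or.inr (Or.inr (Or.inr (Or.inr (Or.inr (Or.inr (Or.inr (Or.inr (Or.inr rfl))))))))), rfl, h⟩

lemma pvR (m : List Char) :
    (pvBigL m).foldl min 4 =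
      if PySem.Chars.isIn "arm".toList m = true then 0
      else if PySem.Chars.isIn "mock".toList m = true ∨ PySem.Chars.isIn "sim".toList m = true ∨ PySem.Chars.isIn "test".toList m = true then 1
      else if PySem.Chars.isIn "sensor".toList m = true ∨ PySem.Chars.isIn "ctd".toList m = true ∨ PySem.Chars.isIn "gps".toList m = true ∨ PySem.Chars.isIn "camera".toList m = true then 2
      else if PySem.Chars.isIn "main".toList m = true ∨ PySem.Chars.isIn "core".toList m = true ∨ PySem.Chars.isIn "base".toList m = true then 3
      else 4 := by
  have hmem := pvMem_iff m
  have hcase := pvFoldlMin_eq_or_mem (pvBigL m) 4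
  split_ifs with h0 h1 h2 h3
  · exact Nat.le_zero.mp (pvFoldlMin_le_mem _ _ 0 ((hmem 0).mpr (by tauto)))
  · have hle := pvFoldlMin_le_mem _ 4 1 ((hmem 1).mpr (Or.inr (Or.inl ⟨rfl, h1⟩)))
    rcases hcase with he | hm
    · omega
    · rcases (hmem _).mp hm with ⟨_, h⟩ | ⟨hp, _⟩ | ⟨hp, _⟩ | ⟨hp, _⟩ <;> first | exact absurd h h0 | omega
  · have hle := pvFoldlMin_le_mem _ 4 2 ((hmem 2).mpr (Or.inr (Or.inr (Or.inl ⟨rfl, h2⟩))))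
    rcases hcase with he | hm
    · omega
    · rcases (hmem _).mp hm with ⟨_, h⟩ | ⟨_, h⟩ | ⟨hp, _⟩ | ⟨hp, _⟩ <;> first | exact absurd h h0 | exact absurd h h1 | omega
  · have hle := pvFoldlMin_le_mem _ 4 3 ((hmem 3).mpr (Or.inr (Or.inr (Or.inr ⟨rfl, h3⟩))))
    rcases hcase with he | hm
    · omega
    · rcases (hmem _).mp hm with ⟨_, h⟩ | ⟨_, h⟩ | ⟨_, h⟩ | ⟨hp, _⟩ <;> first | exact absurd h h0 | exact absurd h h1 | exact absurd h h2 | omega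
  · rcases hcase with he | hm
    · exact he
    · rcases (hmem _).mp hm with ⟨_, h⟩ | ⟨_, h⟩ | ⟨_, h⟩ | ⟨_, h⟩ <;>
        first | exact absurd h h0 | exact absurd h h1 | exact absurd h h2 | exact absurd h h3

-- ===== VERDICT (by name: the statement is the Claim_ definition above) =====
theorem categorize_process_py_spec : Claim_equal_categorize_process_py := by
  intro s _
  unfold Spec_categorize_process_py categorize_process_py categorize_process_py_alt
  simp only [List.any_cons, List.any_nil, Bool.or_false, Bool.or_eq_true, PySem.Str.isIn_eq]
  rw [pvBest_eq, pvR]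
  split_ifs <;> simp [pvCategories] <;> omega
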